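-- pv_equiv track=rewrite | github.com/pythoncodingkids/introduction-to-python | assignment04/solution04.py | minutes_in_between
-- ===== SOURCE A (Python) =====
-- def minutes_in_between(start_hour, start_minute, end_hour, end_minute):
--     if start_hour == end_hour and end_minute >= start_minute:
--         minutes = end_minute - start_minute
--     elif start_hour < end_hour:
--         minutes = (60 - start_minute) + end_minute
--         minutes += (end_hour - (start_hour + 1)) * 60
--     else:
--         minutes = (24 * 60) - minutes_in_between(end_hour, end_minute, start_hour, start_minute)
--
--     return minutes
-- ===== SOURCE B (Python) =====
-- def minutes_in_between(start_hour, start_minute, end_hour, end_minute):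
--     diff = (end_hour * 60 + end_minute) - (start_hour * 60 + start_minute)
--     if (start_hour, start_minute) > (end_hour, end_minute):
--         diff += 1440
--     return diff
-- ===== Notes on version B (the rewrite author's own statement) =====
-- stated objective: simpler
-- what changed: Replaced A's three-branch logic with a one-level recursion (1440 minus the swapped call) by a closed form: total-minutes difference plus 1440 exactly when the start time is later in clock order.
import Mathlib
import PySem

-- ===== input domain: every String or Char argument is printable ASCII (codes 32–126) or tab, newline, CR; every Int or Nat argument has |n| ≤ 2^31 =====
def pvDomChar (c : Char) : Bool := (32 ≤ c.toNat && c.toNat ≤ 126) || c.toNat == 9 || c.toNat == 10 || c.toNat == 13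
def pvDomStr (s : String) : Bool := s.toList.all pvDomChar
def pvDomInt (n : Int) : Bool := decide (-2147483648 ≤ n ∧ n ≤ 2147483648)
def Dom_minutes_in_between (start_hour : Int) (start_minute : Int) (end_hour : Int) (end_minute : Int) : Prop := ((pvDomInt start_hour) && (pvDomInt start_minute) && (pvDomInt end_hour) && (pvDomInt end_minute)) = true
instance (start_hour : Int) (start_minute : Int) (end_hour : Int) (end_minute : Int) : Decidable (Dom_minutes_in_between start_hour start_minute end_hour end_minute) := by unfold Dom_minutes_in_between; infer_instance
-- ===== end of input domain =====

-- B replaces A's three-branch logic with one-level recursion by a closed form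
-- (total-minutes difference, +1440 when the start is later in clock order): simpler.


-- ===== PORT A =====
def minutes_in_between (start_hour : Int) (start_minute : Int) (end_hour : Int) (end_minute : Int) : Int :=
  if start_hour = end_hour ∧ end_minute ≥ start_minute then
    end_minute - start_minute
  else if start_hour < end_hour then
    ((60 - start_minute) + end_minute) + (end_hour - (start_hour + 1)) * 60
  else
    24 * 60 - minutes_in_between end_hour end_minute start_hour start_minute
termination_by (if end_hour < start_hour ∨ (end_hour = start_hour ∧ end_minute < start_minute) then 1 else 0 : Nat)
decreasing_by split_ifs <;> omega

-- ===== PORT B =====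
def minutes_in_between_alt (start_hour : Int) (start_minute : Int) (end_hour : Int) (end_minute : Int) : Int :=
  let diff := (end_hour * 60 + end_minute) - (start_hour * 60 + start_minute)
  if start_hour > end_hour ∨ (start_hour = end_hour ∧ start_minute > end_minute) then
    diff + 1440
  else
    diff

-- ===== PRECONDITION & SPEC =====
def Spec_minutes_in_between (start_hour : Int) (start_minute : Int) (end_hour : Int) (end_minute : Int) (out : Int) : Prop := out = minutes_in_between_alt start_hour start_minute end_hour end_minute
instance (start_hour : Int) (start_minute : Int) (end_hour : Int) (end_minute : Int) (out : Int) : Decidable (Spec_minutes_in_between start_hour start_minute end_hour end_minute out) := by unfold Spec_minutes_in_between; infer_instance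

-- ===== CLAIM (what is proved, stated in full; the proofs are below) =====
def Claim_equal_minutes_in_between : Prop := ∀ (start_hour : Int) (start_minute : Int) (end_hour : Int) (end_minute : Int), Dom_minutes_in_between start_hour start_minute end_hour end_minute → Spec_minutes_in_between start_hour start_minute end_hour end_minute (minutes_in_between start_hour start_minute end_hour end_minute)

-- ===== LEMMAS AND PROOFS =====
theorem minutes_in_between_eq (sh sm eh em : Int) :
    minutes_in_between sh sm eh em = minutes_in_between_alt sh sm eh em := by
  rw [minutes_in_between]
  by_cases h1 : sh = eh ∧ em ≥ sm
  · simp only [if_pos h1, minutes_in_between_alt]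
    split_ifs <;> omega
  · by_cases h2 : sh < eh
    · simp only [if_neg h1, if_pos h2, minutes_in_between_alt]
      split_ifs <;> omega
    · simp only [if_neg h1, if_neg h2]
      rw [minutes_in_between]
      by_cases h3 : eh = sh ∧ sm ≥ em
      · simp only [if_pos h3, minutes_in_between_alt]
        split_ifs <;> omega
      · have h4 : eh < sh := by omega
        simp only [if_neg h3, if_pos h4, minutes_in_between_alt]
        split_ifs <;> omega

-- ===== VERDICT (by name: the statement is the Claim_ definition above) =====
theorem minutes_in_between_spec : Claim_equal_minutes_in_between := by
  intro sh sm eh em _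
  exact minutes_in_between_eq sh sm eh em
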